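-- pv_equiv track=rewrite | github.com/violetadieu/coding-club-hr | 20180829-week2/doragee/isFibo.py | solve
-- ===== SOURCE A (Python) =====
-- def solve(numberList):
--   result = []
--
--   for n in numberList:
--     isFibo = False
--     first, second = 1, 1
--     if (n < 1):
--       pass
--     if (n == 1):
--       isFibo = True
--       pass
--
--     while (n >= second):
--       if (n == second):
--         isFibo = True
--         break
--       first, second = second, first + second
--
--     r = 'isFibo' if isFibo else 'isNotFibo'
--     result.append(r)
--
--   return result
-- ===== SOURCE B (Python) =====
-- def solve(numberList):
--     if not numberList:
--         return []
--     m = max(numberList)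
--     fibs = []
--     a, b = 1, 1
--     while b <= m:
--         fibs.append(b)
--         a, b = b, a + b
--     return ['isFibo' if n in fibs else 'isNotFibo' for n in numberList]
-- ===== Notes on version B (the rewrite author's own statement) =====
-- stated objective: simpler
-- what changed: B precomputes the Fibonacci table once up to max(numberList) and answers each element by membership, instead of regenerating the Fibonacci sequence from 1,1 for every element.
import Mathlib
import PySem

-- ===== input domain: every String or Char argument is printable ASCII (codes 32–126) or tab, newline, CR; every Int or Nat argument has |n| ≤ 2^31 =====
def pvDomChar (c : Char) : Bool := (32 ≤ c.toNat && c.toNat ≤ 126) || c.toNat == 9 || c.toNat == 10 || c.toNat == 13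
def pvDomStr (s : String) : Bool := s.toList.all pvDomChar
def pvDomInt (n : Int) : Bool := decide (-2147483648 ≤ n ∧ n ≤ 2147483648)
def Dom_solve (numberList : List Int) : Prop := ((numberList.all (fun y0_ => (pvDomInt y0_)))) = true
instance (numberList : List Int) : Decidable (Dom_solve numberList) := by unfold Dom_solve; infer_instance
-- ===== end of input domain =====

-- B precomputes the Fibonacci table once up to max(numberList) and answers each element by
-- membership, instead of regenerating the Fibonacci sequence from 1,1 for every element.

-- ===== PORT A =====
-- A's inner while loop: advance (first, second) through the Fibonacci sequence while n >= second,
-- returning true iff it breaks with n == second.  The 1 ≤ first / 1 ≤ second hypotheses only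
-- justify termination (in Python the loop terminates because the pair stays positive).
def fibCheck (first second n : Int) (hf : 1 ≤ first) (hs : 1 ≤ second) : Bool :=
  if _h : second ≤ n then
    if n = second then true
    else fibCheck second (first + second) n hs (by omega)
  else false
termination_by (n + 1 - second).toNat
decreasing_by omega

def solve (numberList : List Int) : List String :=
  numberList.foldl
    (fun result n =>
      -- isFibo = False; first, second = 1, 1; if n < 1: pass; if n == 1: isFibo = True
      let isFibo : Bool := (n == 1) || fibCheck 1 1 n (by omega) (by omega)
      let r := if isFibo then "isFibo" else "isNotFibo"
      result ++ [r])
    []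

-- ===== PORT B =====
-- B's while loop: the list of generated Fibonacci values b = 1, 2, 3, 5, ... that are ≤ m.
def fibList (a b m : Int) (ha : 1 ≤ a) (hb : 1 ≤ b) : List Int :=
  if _h : b ≤ m then b :: fibList b (a + b) m hb (by omega)
  else []
termination_by (m + 1 - b).toNat
decreasing_by omega

def solve_alt (numberList : List Int) : List String :=
  match PySem.List.max? numberList (fun x => x) with
  | none => []
  | some m =>
    let fibs := fibList 1 1 m (by omega) (by omega)
    numberList.map (fun n => if fibs.contains n then "isFibo" else "isNotFibo")

-- ===== PRECONDITION & SPEC =====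
def Spec_solve (numberList : List Int) (out : List String) : Prop := out = solve_alt numberList
instance (numberList : List Int) (out : List String) : Decidable (Spec_solve numberList out) := by unfold Spec_solve; infer_instance

-- ===== CLAIM (what is proved, stated in full; the proofs are below) =====
def Claim_equal_solve : Prop := ∀ (numberList : List Int), Dom_solve numberList → Spec_solve numberList (solve numberList)

-- ===== LEMMAS AND PROOFS =====

-- every element of fibList a b m is at least b
theorem fibList_lb (a b m : Int) (ha : 1 ≤ a) (hb : 1 ≤ b) :
    ∀ x ∈ fibList a b m ha hb, b ≤ x := by
  rw [fibList]
  split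
  · intro x hx
    rcases List.mem_cons.mp hx with rfl | hx'
    · omega
    · have := fibList_lb b (a + b) m hb (by omega) x hx'
      omega
  · intro x hx
    simp at hx
termination_by (m + 1 - b).toNat
decreasing_by omega

-- the A-side scan agrees with membership in the B-side table, for any bound m ≥ n
theorem fibCheck_eq_contains (a b n m : Int) (ha : 1 ≤ a) (hb : 1 ≤ b) (hnm : n ≤ m) :
    fibCheck a b n ha hb = (fibList a b m ha hb).contains n := by
  rw [fibCheck, fibList]
  by_cases h : b ≤ n
  · rw [dif_pos h, dif_pos (by omega)]
    by_cases hne : n = b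
    · rw [if_pos hne]
      simp [hne]
    · rw [if_neg hne, fibCheck_eq_contains b (a + b) n m hb (by omega) hnm]
      simp [hne]
  · rw [dif_neg h]
    by_cases hbm : b ≤ m
    · rw [dif_pos hbm]
      have hlb := fibList_lb b (a + b) m hb (by omega)
      simp only [List.contains_cons]
      have h1 : (n == b) = false := by simp; omega
      have h2 : (fibList b (a + b) m hb (by omega)).contains n = false := by
        simp only [List.contains_eq_any_beq, List.any_eq_false]
        intro x hx
        have := hlb x hx
        simp; omega
      simp only [h1, Bool.false_or]
      exact h2.symm
    · rw [dif_neg hbm]; simp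
termination_by (n + 1 - b).toNat
decreasing_by omega

-- the n == 1 initialization in A is absorbed by the while loop (fibCheck 1 1 1 = true)
theorem fibCheck_one (n : Int) (h : n = 1) :
    ((n == 1) || fibCheck 1 1 n (by omega) (by omega)) = fibCheck 1 1 n (by omega) (by omega) := by
  subst h; rw [fibCheck]; simp

theorem fibCheck_init (n : Int) :
    ((n == 1) || fibCheck 1 1 n (by omega) (by omega)) = fibCheck 1 1 n (by omega) (by omega) := by
  by_cases h : n = 1
  · exact fibCheck_one n h
  · simp [h]

-- A's append-accumulating fold is map
theorem foldl_append_map (f : Int → String) (l : List Int) (acc : List String) :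
    l.foldl (fun result n => result ++ [f n]) acc = acc ++ l.map f := by
  induction l generalizing acc with
  | nil => simp
  | cons x t ih => simp [List.foldl_cons, ih]

-- ===== VERDICT (by name: the statement is the Claim_ definition above) =====
theorem solve_spec : Claim_equal_solve := by
  intro numberList _
  unfold Spec_solve solve solve_alt
  rw [foldl_append_map]
  cases hmax : PySem.List.max? numberList (fun x => x) with
  | none =>
    rw [PySem.List.max?_eq_none_iff] at hmax
    subst hmax; rfl
  | some m =>
    have hle := PySem.List.max?_isMax hmax
    simp only [List.nil_append]
    apply List.map_congr_left
    intro n hn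
    rw [fibCheck_init, fibCheck_eq_contains 1 1 n m (by omega) (by omega) (hle n hn)]
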